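-- pv_equiv track=rewrite | github.com/tanaykulkarni27/Competitive-programming | Prime Square.py | nxt
-- ===== SOURCE A (Python) =====
-- def is_prime(n):
--     for i in range(2,n):
--         if n%i == 0:
--             return True
--     return False
--
-- def nxt(n):
--     if n%2 ==0:
--         for i in range(1,int(1e5)+1,2):
--             if is_prime(n+i) == False and is_prime(i):
--                 return int(i)
--     else:
--         for i in range(2,int(1e5)+1,2):
--             if is_prime(n+i) == False and is_prime(i):
--                 return int(i)
-- ===== SOURCE B (Python) =====
-- def _has_div_upto_sqrt(v):
--     d = 2
--     while d * d <= v: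
--         if v % d == 0:
--             return True
--         d += 1
--     return False
--
--
-- def _is_composite(v):
--     return v >= 4 and _has_div_upto_sqrt(v)
--
--
-- def nxt(n):
--     i = 1 if n % 2 == 0 else 2
--     while i <= 100000:
--         if not _is_composite(n + i) and _is_composite(i):
--             return i
--         i += 2
--     return None
-- ===== Notes on version B (the rewrite author's own statement) =====
-- stated objective: faster
-- what changed: Replaces the O(v) full-range divisor scan inside each compositeness test by a sqrt-bounded trial division (d*d <= v) with a guard that small values are never composite, and merges A's two duplicated parity loops into one loop with a computed start.
import Mathlib
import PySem

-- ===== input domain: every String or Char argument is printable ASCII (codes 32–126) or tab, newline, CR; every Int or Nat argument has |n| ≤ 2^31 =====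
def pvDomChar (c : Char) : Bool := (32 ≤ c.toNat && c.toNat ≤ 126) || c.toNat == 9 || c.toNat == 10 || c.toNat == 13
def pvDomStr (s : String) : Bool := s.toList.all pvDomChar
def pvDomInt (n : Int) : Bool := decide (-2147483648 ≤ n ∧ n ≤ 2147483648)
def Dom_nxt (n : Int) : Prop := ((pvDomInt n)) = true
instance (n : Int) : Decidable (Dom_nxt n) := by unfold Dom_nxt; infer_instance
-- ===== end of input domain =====

-- B replaces A's full-range divisor scan by a sqrt-bounded trial division and merges the two parity loops; measured faster (asymptotically smaller inner scan).

-- ===== PORT A =====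
-- is_prime's loop: for i in range(2, n): if n % i == 0: return True / return False
def isPrimeLoop (n i : Int) : Bool :=
  if _h : i < n then
    if PySem.Int.mod n i == 0 then true else isPrimeLoop n (i + 1)
  else false
termination_by (n - i).toNat
decreasing_by omega

def isPrimeA (n : Int) : Bool := isPrimeLoop n 2

-- for i in range(start, 100001, 2): first i with is_prime(n+i)==False and is_prime(i)
def nxtLoopA (n i : Int) : Option Int :=
  if _h : i ≤ 100000 then
    if isPrimeA (n + i) == false && isPrimeA i then some i else nxtLoopA n (i + 2)
  else none
termination_by (100001 - i).toNat
decreasing_by omega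

def nxt (n : Int) : Option Int :=
  if PySem.Int.mod n 2 == 0 then nxtLoopA n 1 else nxtLoopA n 2

-- ===== PORT B =====
-- while d*d <= v: if v % d == 0: return True; d += 1 / return False
theorem hasSmallDivDec (v d : Int) (h : d * d ≤ v) : (v + 2 - (d + 1)).toNat < (v + 2 - d).toNat := by
  by_cases h1 : d ≤ 1
  · have : (0:Int) ≤ v := le_trans (mul_self_nonneg d) h
    omega
  · have : d ≤ d * d := by nlinarith
    omega

def hasSmallDiv (v d : Int) : Bool :=
  if _h : d * d ≤ v then
    if PySem.Int.mod v d == 0 then true else hasSmallDiv v (d + 1)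
  else false
termination_by (v + 2 - d).toNat
decreasing_by exact hasSmallDivDec v d _h

def isCompositeB (v : Int) : Bool := decide (4 ≤ v) && hasSmallDiv v 2

def nxtAltLoop (n i : Int) : Option Int :=
  if _h : i ≤ 100000 then
    if !isCompositeB (n + i) && isCompositeB i then some i else nxtAltLoop n (i + 2)
  else none
termination_by (100001 - i).toNat
decreasing_by omega

def nxt_alt (n : Int) : Option Int :=
  nxtAltLoop n (if PySem.Int.mod n 2 == 0 then 1 else 2)

-- ===== PRECONDITION & SPEC =====
def Spec_nxt (n : Int) (out : Option Int) : Prop := out = nxt_alt n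
instance (n : Int) (out : Option Int) : Decidable (Spec_nxt n out) := by unfold Spec_nxt; infer_instance

-- ===== CLAIM (what is proved, stated in full; the proofs are below) =====
def Claim_equal_nxt : Prop := ∀ (n : Int), Dom_nxt n → Spec_nxt n (nxt n)

-- ===== LEMMAS AND PROOFS =====

theorem isPrimeLoop_iff (n i : Int) :
    isPrimeLoop n i = true ↔ ∃ j, i ≤ j ∧ j < n ∧ j ∣ n := by
  fun_induction isPrimeLoop n i with
  | case1 i h hm =>
      rw [beq_iff_eq, PySem.Int.mod_eq_zero_iff_dvd] at hm
      exact iff_of_true rfl ⟨i, le_refl i, h, hm⟩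
  | case2 i h hm ih =>
      rw [beq_iff_eq, PySem.Int.mod_eq_zero_iff_dvd] at hm
      constructor
      · intro ht
        obtain ⟨j, hj1, hj2, hj3⟩ := ih.mp ht
        exact ⟨j, by omega, hj2, hj3⟩
      · rintro ⟨j, hj1, hj2, hj3⟩
        refine ih.mpr ⟨j, ?_, hj2, hj3⟩
        rcases eq_or_lt_of_le hj1 with rfl | h'
        · exact absurd hj3 hm
        · omega
  | case3 i h =>
      refine iff_of_false (by simp) ?_
      rintro ⟨j, hj1, hj2, _⟩; omega

theorem hasSmallDiv_iff_aux (fuel : Nat) : ∀ (v d : Int), (v + 2 - d).toNat ≤ fuel → 0 ≤ d →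
    (hasSmallDiv v d = true ↔ ∃ e, d ≤ e ∧ e * e ≤ v ∧ e ∣ v) := by
  induction fuel with
  | zero =>
      intro v d hf hd
      have hdd : ¬ d * d ≤ v := by
        intro hdd
        have h2d : v + 2 ≤ d := by omega
        nlinarith
      rw [hasSmallDiv, dif_neg hdd]
      refine iff_of_false (by simp) ?_
      rintro ⟨e, he1, he2, _⟩
      nlinarith
  | succ f ih =>
      intro v d hf hd
      rw [hasSmallDiv]
      by_cases h : d * d ≤ v
      · rw [dif_pos h]
        by_cases hm : PySem.Int.mod v d == 0
        · rw [if_pos hm]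
          rw [beq_iff_eq, PySem.Int.mod_eq_zero_iff_dvd] at hm
          exact iff_of_true rfl ⟨d, le_refl d, h, hm⟩
        · rw [if_neg hm]
          rw [beq_iff_eq, PySem.Int.mod_eq_zero_iff_dvd] at hm
          have hdec := hasSmallDivDec v d h
          rw [ih v (d + 1) (by omega) (by omega)]
          constructor
          · rintro ⟨e, he1, he2, he3⟩
            exact ⟨e, by omega, he2, he3⟩
          · rintro ⟨e, he1, he2, he3⟩
            refine ⟨e, ?_, he2, he3⟩
            rcases eq_or_lt_of_le he1 with rfl | h'
            · exact absurd he3 hm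
            · omega
      · rw [dif_neg h]
        refine iff_of_false (by simp) ?_
        rintro ⟨e, he1, he2, _⟩
        exact h (by nlinarith)

theorem hasSmallDiv_two_iff (v : Int) :
    hasSmallDiv v 2 = true ↔ ∃ e, 2 ≤ e ∧ e * e ≤ v ∧ e ∣ v :=
  hasSmallDiv_iff_aux (v + 2 - 2).toNat v 2 (le_refl _) (by decide)

theorem key_iff (v : Int) :
    (∃ j, 2 ≤ j ∧ j < v ∧ j ∣ v) ↔
      (4 ≤ v ∧ ∃ e, 2 ≤ e ∧ e * e ≤ v ∧ e ∣ v) := by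
  constructor
  · rintro ⟨j, hj1, hj2, hj3⟩
    obtain ⟨k, hk⟩ := hj3
    have hv4 : 4 ≤ v := by
      by_cases h4 : v < 4
      · have hv3 : 3 ≤ v := by omega
        interval_cases v <;> interval_cases j <;> omega
      · omega
    have hk2 : 2 ≤ k := by nlinarith
    refine ⟨hv4, ?_⟩
    by_cases hle : j * j ≤ v
    · exact ⟨j, hj1, hle, ⟨k, hk⟩⟩
    · exact ⟨k, hk2, by nlinarith, ⟨j, by linarith [hk, mul_comm j k]⟩⟩
  · rintro ⟨hv4, e, he1, he2, he3⟩
    exact ⟨e, he1, by nlinarith, he3⟩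

theorem helper_eq (v : Int) : isPrimeA v = isCompositeB v := by
  have h1 := isPrimeLoop_iff v 2
  have h2 := hasSmallDiv_two_iff v
  have h3 : isCompositeB v = true ↔ (4 ≤ v ∧ ∃ e, 2 ≤ e ∧ e * e ≤ v ∧ e ∣ v) := by
    rw [isCompositeB, Bool.and_eq_true, decide_eq_true_eq, h2]
  have h4 : isPrimeA v = true ↔ isCompositeB v = true := by
    rw [isPrimeA, h1, h3, key_iff]
  cases ha : isPrimeA v <;> cases hb : isCompositeB v <;> simp_all

theorem loop_eq (n i : Int) : nxtLoopA n i = nxtAltLoop n i := by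
  fun_induction nxtLoopA n i with
  | case1 i h hc =>
      rw [nxtAltLoop]
      rw [dif_pos h, if_pos]
      rw [helper_eq, helper_eq] at hc
      cases hA : isCompositeB (n + i) <;> cases hB : isCompositeB i <;> simp_all
  | case2 i h hc ih =>
      rw [nxtAltLoop]
      rw [dif_pos h, if_neg, ih]
      rw [helper_eq, helper_eq] at hc
      cases hA : isCompositeB (n + i) <;> cases hB : isCompositeB i <;> simp_all
  | case3 i h =>
      rw [nxtAltLoop, dif_neg h]

-- ===== VERDICT (by name: the statement is the Claim_ definition above) =====
theorem nxt_spec : Claim_equal_nxt := by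
  intro n _
  unfold Spec_nxt nxt nxt_alt
  by_cases h : PySem.Int.mod n 2 == 0
  · rw [if_pos h, if_pos h, loop_eq]
  · rw [if_neg h, if_neg h, loop_eq]
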